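-- pv_equiv track=rewrite | github.com/urfavbarae/competition-ens | Python/serie(list)/ex4-1.py | sommecon
-- ===== SOURCE A (Python) =====
-- def sommecon(ch):
--     l=[]
--     l=ch
--     i1=""
--     #verifier la chaine si elle contient seulement des "+" et des numeros
--     c="123456789+0"
--     for i in ch:
--         if i not in c:
--             return -1
--     for i in l:
--         if i=="+" and i1=="+":
--             return -1
--         i1=i
--     if l[0]=="+" or l[-1]=="+":
--         return -1
--     else:
--         somme=0 #65+54+1+874+54
--         l1=ch.split("+")
--         for i in l1:
--             somme+=int(i)
--         return somme
-- ===== SOURCE B (Python) =====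
-- def sommecon(ch):
--     # single-pass parser: validate and accumulate in one scan
--     if ch[-1] == '+' or ch[0] == '+':
--         return -1
--     somme = 0
--     cur = 0
--     prev = ''
--     for c in ch:
--         if c.isdigit():
--             cur = cur * 10 + int(c)
--         elif c == '+':
--             if prev == '+':
--                 return -1
--             somme += cur
--             cur = 0
--         else:
--             return -1
--         prev = c
--     return somme + cur
-- ===== Notes on version B (the rewrite author's own statement) =====
-- stated objective: alternative
-- what changed: A makes three separate validation passes (character whitelist, adjacent separators, edge separators) and then splits the string on the plus sign and sums int() of each piece; B is a single integrated scan that validates and accumulates the running total and the current number in one pass.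
import Mathlib
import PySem

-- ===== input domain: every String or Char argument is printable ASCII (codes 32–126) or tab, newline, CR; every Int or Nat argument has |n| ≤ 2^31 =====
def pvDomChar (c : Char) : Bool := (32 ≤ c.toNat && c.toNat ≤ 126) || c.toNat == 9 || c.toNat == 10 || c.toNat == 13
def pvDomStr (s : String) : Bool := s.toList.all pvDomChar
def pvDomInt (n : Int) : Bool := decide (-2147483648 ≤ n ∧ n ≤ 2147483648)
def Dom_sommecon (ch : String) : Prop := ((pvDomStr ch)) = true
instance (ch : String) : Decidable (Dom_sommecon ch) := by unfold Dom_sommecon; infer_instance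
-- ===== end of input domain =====

-- B replaces A's three validation passes plus str.split/int by one integrated scan (different decomposition, same values).

-- ===== PORT A =====
-- first loop: `for i in ch: if i not in c: return -1` with c = "123456789+0"
def sommeconChk1 : List Char → Bool
  | [] => true
  | i :: rest => if ("123456789+0".toList.contains i) then sommeconChk1 rest else false

-- second loop: `for i in l: if i=="+" and i1=="+": return -1; i1=i`
-- (Python's i1 starts as the empty string "", modeled as `none`; a seen char i is `some i`)
def sommeconChk2 : List Char → Option Char → Bool
  | [], _ => true
  | i :: rest, i1 => if i = '+' ∧ i1 = some '+' then false else sommeconChk2 rest (some i)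

-- int(i): hand port, exact on the nonempty all-digit parts that reach it after the checks above
def sommeconInt (p : List Char) : Int := p.foldl (fun a c => a * 10 + ((c.toNat : Int) - 48)) 0

def sommecon (ch : String) : Int :=
  let l := ch.toList
  if sommeconChk1 l = false then -1
  else if sommeconChk2 l none = false then -1
  else if PySem.List.pyGetD l 0 ' ' = '+' ∨ PySem.List.pyGetD l (-1) ' ' = '+' then -1
  else (PySem.Chars.splitOn l ['+']).foldl (fun somme i => somme + sommeconInt i) 0

-- ===== PORT B =====
-- the single scan: running total `somme`, current number `cur`, previous char `prev` ('' = none)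
def sommeconScan : List Char → Option Char → Int → Int → Int
  | [], _, somme, cur => somme + cur
  | c :: rest, prev, somme, cur =>
    if PySem.Str.isdigit c then sommeconScan rest (some c) somme (cur * 10 + ((c.toNat : Int) - 48))
    else if c = '+' then
      if prev = some '+' then -1 else sommeconScan rest (some c) (somme + cur) 0
    else -1

def sommecon_alt (ch : String) : Int :=
  let l := ch.toList
  if PySem.List.pyGetD l (-1) ' ' = '+' ∨ PySem.List.pyGetD l 0 ' ' = '+' then -1
  else sommeconScan l none 0 0

-- ===== PRECONDITION & SPEC =====
-- Pre_ excludes only the empty string, on which A raises IndexError at l[0] (B raises there too).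
def Pre_sommecon (ch : String) : Prop := ch ≠ ""
instance (ch : String) : Decidable (Pre_sommecon ch) := by unfold Pre_sommecon; infer_instance
def pvWitness_sommecon : String := "65+54+1"

def Spec_sommecon (ch : String) (out : Int) : Prop := out = sommecon_alt ch
instance (ch : String) (out : Int) : Decidable (Spec_sommecon ch out) := by unfold Spec_sommecon; infer_instance

-- ===== CLAIM (what is proved, stated in full; the proofs are below) =====
def Claim_equal_sommecon : Prop := ∀ (ch : String), Dom_sommecon ch → Pre_sommecon ch → Spec_sommecon ch (sommecon ch)

-- ===== LEMMAS AND PROOFS =====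

-- hand characterization of PySem.Chars.splitOn with separator "+"
def sommeconParts : List Char → List Char → List (List Char)
  | [], cur => [cur.reverse]
  | c :: rest, cur => if c = '+' then cur.reverse :: sommeconParts rest [] else sommeconParts rest (c :: cur)

def sommeconDigitsFrom (a : Int) (p : List Char) : Int :=
  p.foldl (fun a c => a * 10 + ((c.toNat : Int) - 48)) a

def sommeconSumParts (a : Int) : List (List Char) → Int
  | [] => a
  | p :: ps => sommeconDigitsFrom a p + (ps.map (sommeconDigitsFrom 0)).sum

lemma sommecon_go_eq (l : List Char) : ∀ (fuel : Nat) (cur : List Char) (acc : List (List Char)),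
    l.length < fuel →
    PySem.Chars.splitOn.go ['+'] fuel l cur acc = acc.reverse ++ sommeconParts l cur := by
  induction l with
  | nil =>
    intro fuel cur acc h
    cases fuel with
    | zero => omega
    | succ f => simp [PySem.Chars.splitOn.go, sommeconParts]
  | cons c rest ih =>
    intro fuel cur acc h
    cases fuel with
    | zero => omega
    | succ f =>
      rw [PySem.Chars.splitOn.go]
      by_cases hc : c = '+'
      · subst hc
        simp only [List.isPrefixOf, List.length_cons, List.drop, BEq.rfl, Bool.and_true, if_true, List.length_nil, List.drop_zero]
        rw [ih f [] (cur.reverse :: acc) (by simpa using h)]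
        simp [sommeconParts]
      · have hp : (['+'].isPrefixOf (c :: rest)) = false := by
          simp [List.isPrefixOf]; exact fun h' => (hc h'.symm).elim
        simp only [hp, Bool.false_eq_true, if_false]
        rw [ih f (c :: cur) acc (by simpa using h)]
        simp [sommeconParts, hc]

lemma sommecon_splitOn_eq (l : List Char) :
    PySem.Chars.splitOn l ['+'] = sommeconParts l [] := by
  rw [PySem.Chars.splitOn, sommecon_go_eq l (l.length + 1) [] [] (by omega)]
  simp

lemma sommecon_char_eq_iff (a b : Char) : (a = b) ↔ a.toNat = b.toNat :=
  ⟨fun h => h ▸ rfl, fun h => Char.le_antisymm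
    (by simp only [Char.le_def, UInt32.le_iff_toNat_le, Char.toNat_val]; omega)
    (by simp only [Char.le_def, UInt32.le_iff_toNat_le, Char.toNat_val]; omega)⟩

lemma sommecon_char_le_iff (a b : Char) : (a ≤ b) ↔ a.toNat ≤ b.toNat := by
  simp only [Char.le_def, UInt32.le_iff_toNat_le, Char.toNat_val]

lemma sommecon_mem_chk (c : Char) :
    ("123456789+0".toList.contains c) = (PySem.Str.isdigit c || c == '+') := by
  have h : "123456789+0".toList = ['1','2','3','4','5','6','7','8','9','+','0'] := by decide
  rw [h, Bool.eq_iff_iff]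
  simp only [List.contains_eq_mem, List.mem_cons, List.not_mem_nil, or_false, PySem.Str.isdigit,
    PySem.Chars.isdigit, Bool.or_eq_true, Bool.and_eq_true, decide_eq_true_eq, beq_iff_eq,
    sommecon_char_eq_iff, sommecon_char_le_iff]
  have e1 : ('1':Char).toNat = 49 := rfl
  have e2 : ('2':Char).toNat = 50 := rfl
  have e3 : ('3':Char).toNat = 51 := rfl
  have e4 : ('4':Char).toNat = 52 := rfl
  have e5 : ('5':Char).toNat = 53 := rfl
  have e6 : ('6':Char).toNat = 54 := rfl
  have e7 : ('7':Char).toNat = 55 := rfl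
  have e8 : ('8':Char).toNat = 56 := rfl
  have e9 : ('9':Char).toNat = 57 := rfl
  have e0 : ('0':Char).toNat = 48 := rfl
  have ep : ('+':Char).toNat = 43 := rfl
  rw [e1, e2, e3, e4, e5, e6, e7, e8, e9, e0, ep]
  omega

lemma sommecon_chk1_iff (l : List Char) :
    sommeconChk1 l = true ↔ ∀ c ∈ l, PySem.Str.isdigit c = true ∨ c = '+' := by
  induction l with
  | nil => simp [sommeconChk1]
  | cons c rest ih =>
    rw [sommeconChk1]
    by_cases hc : ("123456789+0".toList.contains c) = true
    · have := sommecon_mem_chk c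
      rw [hc] at this
      simp only [hc, if_true, ih, List.mem_cons]
      constructor
      · rintro h x (rfl | hx)
        · rcases Bool.or_eq_true_iff.mp this.symm with h' | h'
          · exact Or.inl h'
          · exact Or.inr (by simpa using h')
        · exact h x hx
      · intro h x hx; exact h x (Or.inr hx)
    · simp only [hc, if_false, Bool.false_eq_true, false_iff, not_forall]
      refine ⟨c, by simp, ?_⟩
      rw [sommecon_mem_chk] at hc
      simp at hc
      exact fun h => by simp [hc.1, hc.2] at h

lemma sommecon_scan_invalid (l : List Char) :
    ∀ (prev : Option Char) (s cur : Int),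
    (∃ c ∈ l, ¬(PySem.Str.isdigit c = true ∨ c = '+')) →
    sommeconScan l prev s cur = -1 := by
  induction l with
  | nil => simp
  | cons c rest ih =>
    rintro prev s cur ⟨x, hx, hbad⟩
    push_neg at hbad
    rw [sommeconScan]
    rcases List.mem_cons.mp hx with rfl | hx'
    · simp [hbad.1, hbad.2]
    · by_cases hd : PySem.Str.isdigit c = true
      · rw [if_pos hd]; exact ih _ _ _ ⟨x, hx', by push_neg; exact hbad⟩
      · rw [if_neg hd]
        by_cases hp : c = '+'
        · rw [if_pos hp]
          by_cases hprev : prev = some '+'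
          · rw [if_pos hprev]
          · rw [if_neg hprev]; exact ih _ _ _ ⟨x, hx', by push_neg; exact hbad⟩
        · rw [if_neg hp]

lemma sommecon_scan_chk2_false (l : List Char) :
    ∀ (prev : Option Char) (s cur : Int),
    (∀ c ∈ l, PySem.Str.isdigit c = true ∨ c = '+') →
    sommeconChk2 l prev = false →
    sommeconScan l prev s cur = -1 := by
  induction l with
  | nil => simp [sommeconChk2]
  | cons c rest ih =>
    intro prev s cur hval hchk
    rw [sommeconChk2] at hchk
    rw [sommeconScan]
    by_cases hcp : c = '+' ∧ prev = some '+'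
    · obtain ⟨rfl, hprev⟩ := hcp
      have hd : ¬(PySem.Str.isdigit '+' = true) := by decide
      rw [if_neg hd, if_pos rfl, if_pos hprev]
    · rw [if_neg hcp] at hchk
      by_cases hd : PySem.Str.isdigit c = true
      · rw [if_pos hd]
        exact ih _ _ _ (fun x hx => hval x (List.mem_cons_of_mem _ hx)) hchk
      · rw [if_neg hd]
        rcases hval c List.mem_cons_self with h | h
        · exact absurd h hd
        · rw [if_pos h]
          have hprev : prev ≠ some '+' := fun hp => hcp ⟨h, hp⟩
          rw [if_neg hprev]
          exact ih _ _ _ (fun x hx => hval x (List.mem_cons_of_mem _ hx)) hchk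

lemma sommecon_parts_ne_nil (l : List Char) : ∀ (cur : List Char), sommeconParts l cur ≠ [] := by
  induction l with
  | nil => intro cur; simp [sommeconParts]
  | cons c rest ih =>
    intro cur
    rw [sommeconParts]
    by_cases hc : c = '+'
    · simp [hc]
    · rw [if_neg hc]; exact ih _

lemma sommecon_parts_acc (l : List Char) : ∀ (cur : List Char),
    sommeconParts l cur = (sommeconParts l []).modifyHead (fun p => cur.reverse ++ p) := by
  induction l with
  | nil => intro cur; simp [sommeconParts]
  | cons c rest ih =>
    intro cur
    rw [sommeconParts, sommeconParts]
    by_cases hc : c = '+'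
    · simp [hc]
    · rw [if_neg hc, if_neg hc, ih (c :: cur), ih [c]]
      rcases hP : sommeconParts rest [] with _ | ⟨p, ps⟩
      · exact absurd hP (sommecon_parts_ne_nil rest [])
      · simp

lemma sommecon_digitsFrom_cons (a : Int) (c : Char) (p : List Char) :
    sommeconDigitsFrom a (c :: p) = sommeconDigitsFrom (a * 10 + ((c.toNat : Int) - 48)) p := rfl

lemma sommecon_scan_valid (l : List Char) :
    ∀ (prev : Option Char) (somme cur : Int),
    (∀ c ∈ l, PySem.Str.isdigit c = true ∨ c = '+') →
    sommeconChk2 l prev = true →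
    sommeconScan l prev somme cur = somme + sommeconSumParts cur (sommeconParts l []) := by
  induction l with
  | nil => intro prev somme cur _ _; simp [sommeconScan, sommeconParts, sommeconSumParts, sommeconDigitsFrom]
  | cons c rest ih =>
    intro prev somme cur hval hchk
    rw [sommeconChk2] at hchk
    rw [sommeconScan, sommeconParts]
    by_cases hd : PySem.Str.isdigit c = true
    · have hc : c ≠ '+' := by
        intro h; subst h; exact absurd hd (by decide)
      rw [if_pos hd, if_neg hc]
      rw [if_neg (fun h : c = '+' ∧ prev = some '+' => hc h.1)] at hchk
      rw [ih (some c) somme (cur * 10 + ((c.toNat : Int) - 48))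
        (fun x hx => hval x (List.mem_cons_of_mem _ hx)) hchk]
      rw [sommecon_parts_acc rest [c]]
      rcases hP : sommeconParts rest [] with _ | ⟨p, ps⟩
      · exact absurd hP (sommecon_parts_ne_nil rest [])
      · simp [sommeconSumParts, sommecon_digitsFrom_cons]
    · rw [if_neg hd]
      rcases hval c List.mem_cons_self with h | hc
      · exact absurd h hd
      · rw [if_pos hc, if_pos hc]
        subst hc
        have hprev : prev ≠ some '+' := by
          intro hp
          rw [if_pos ⟨rfl, hp⟩] at hchk
          exact Bool.false_ne_true hchk
        rw [if_neg hprev]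
        rw [if_neg (fun h : ('+':Char) = '+' ∧ prev = some '+' => hprev h.2)] at hchk
        rw [ih (some '+') (somme + cur) 0
          (fun x hx => hval x (List.mem_cons_of_mem _ hx)) hchk]
        rcases hP : sommeconParts rest [] with _ | ⟨p, ps⟩
        · exact absurd hP (sommecon_parts_ne_nil rest [])
        · simp [sommeconSumParts, sommeconDigitsFrom]
          ring

lemma sommecon_foldl_sum (ps : List (List Char)) : ∀ (a : Int),
    ps.foldl (fun somme i => somme + sommeconInt i) a = a + (ps.map (sommeconDigitsFrom 0)).sum := by
  induction ps with
  | nil => intro a; simp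
  | cons p ps ih =>
    intro a
    rw [List.foldl_cons, ih]
    have : sommeconInt p = sommeconDigitsFrom 0 p := rfl
    rw [this]
    simp
    ring

-- ===== VERDICT (by name: the statement is the Claim_ definition above) =====
theorem sommecon_spec : Claim_equal_sommecon := by
  intro ch hdom hpre
  unfold Spec_sommecon sommecon sommecon_alt
  have hl : ch.toList ≠ [] := by
    intro h
    exact hpre (by simpa using congrArg String.ofList h)
  by_cases h1 : sommeconChk1 ch.toList = true
  · have hval := (sommecon_chk1_iff ch.toList).mp h1
    rw [if_neg (by simp [h1])]
    by_cases h2 : sommeconChk2 ch.toList none = true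
    · rw [if_neg (by simp [h2])]
      by_cases hg : PySem.List.pyGetD ch.toList 0 ' ' = '+' ∨ PySem.List.pyGetD ch.toList (-1) ' ' = '+'
      · rw [if_pos hg, if_pos (Or.symm hg)]
      · rw [if_neg hg, if_neg (fun h => hg (Or.symm h))]
        rw [sommecon_splitOn_eq, sommecon_foldl_sum,
          sommecon_scan_valid ch.toList none 0 0 hval h2]
        rcases hP : sommeconParts ch.toList [] with _ | ⟨p, ps⟩
        · exact absurd hP (sommecon_parts_ne_nil ch.toList [])
        · simp [sommeconSumParts]
    · rw [if_pos (by simpa using h2)]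
      by_cases hg : PySem.List.pyGetD ch.toList (-1) ' ' = '+' ∨ PySem.List.pyGetD ch.toList 0 ' ' = '+'
      · rw [if_pos hg]
      · rw [if_neg hg, sommecon_scan_chk2_false ch.toList none 0 0 hval (by simpa using h2)]
  · rw [if_pos (by simpa using h1)]
    have hbad : ∃ c ∈ ch.toList, ¬(PySem.Str.isdigit c = true ∨ c = '+') := by
      by_contra hno
      push_neg at hno
      exact h1 ((sommecon_chk1_iff ch.toList).mpr (fun c hc => by
        have := hno c hc
        tauto))
    by_cases hg : PySem.List.pyGetD ch.toList (-1) ' ' = '+' ∨ PySem.List.pyGetD ch.toList 0 ' ' = '+'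
    · rw [if_pos hg]
    · rw [if_neg hg, sommecon_scan_invalid ch.toList none 0 0 hbad]
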